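-- pv_equiv track=rewrite | github.com/theabbie/leetcode | find-beautiful-indices-in-the-given-array-ii.py | find_pattern_indices
-- ===== SOURCE A (Python) =====
-- def find_pattern_indices(s, p):
--     s = p + "#" + s
--     n = len(s)
--     Z = [0] * n
--     l = r = 0
--     for i in range(1, n):
--         z = Z[i - l]
--         if i + z >= r:
--             z = max(r - i, 0)
--             while i + z < n and s[z] == s[i + z]:
--                 z += 1
--             l, r = i, i + z
--         Z[i] = z
--         if i > len(p) and z >= len(p):
--             yield i - len(p) - 1
-- ===== SOURCE B (Python) =====
-- def find_pattern_indices(s, p):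
--     # Direct slice comparison at each start position; reproduces A's
--     # empty-pattern behaviour (yields 0..len(s)-1) naturally.
--     for i in range(len(s)):
--         if s[i:i+len(p)] == p:
--             yield i
-- ===== Notes on version B (the rewrite author's own statement) =====
-- stated objective: simpler
-- what changed: Replaces the Z-algorithm over the concatenation p+'#'+s with a direct scan that compares the slice s[i:i+len(p)] against p at each start position, yielding matches (including the empty-pattern indices 0..len(s)-1) without any auxiliary array.
import Mathlib
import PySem

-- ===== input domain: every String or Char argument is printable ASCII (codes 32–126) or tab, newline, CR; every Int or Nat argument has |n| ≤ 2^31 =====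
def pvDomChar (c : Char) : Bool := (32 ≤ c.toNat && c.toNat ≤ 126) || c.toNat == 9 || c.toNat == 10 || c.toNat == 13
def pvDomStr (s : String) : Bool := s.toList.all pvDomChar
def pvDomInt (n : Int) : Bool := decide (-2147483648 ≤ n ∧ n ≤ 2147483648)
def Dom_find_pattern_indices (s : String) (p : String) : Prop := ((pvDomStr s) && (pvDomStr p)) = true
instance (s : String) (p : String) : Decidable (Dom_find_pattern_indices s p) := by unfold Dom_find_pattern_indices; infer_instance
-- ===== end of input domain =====

-- B replaces A's Z-algorithm over p+"#"+s with a direct slice comparison at each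
-- start position (simpler, no auxiliary array); both yield the same index list.

-- ===== PORT A =====
-- the inner `while i + z < n and s[z] == s[i+z]` loop (indices always in range, so getD is exact)
def zWhile (t : List Char) (i : Nat) (z : Nat) : Nat :=
  if _h : i + z < t.length ∧ t.getD z 'a' = t.getD (i + z) 'a' then
    zWhile t i (z + 1)
  else z
termination_by t.length - (i + z)
decreasing_by omega

-- the `for i in range(1, n)` loop, carrying (Z, l, r) and the list of yielded values.
-- `max(r - i, 0)` on Python ints ≥ 0 is Nat truncated subtraction r - i.
def loopA (t : List Char) (m : Nat) (i : Nat) (Z : List Nat) (l r : Nat) (acc : List Int) :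
    List Int :=
  if _h : i < t.length then
    let z0 := Z.getD (i - l) 0
    let st :=
      if r ≤ i + z0 then
        let z1 := zWhile t i (r - i)
        (z1, i, i + z1)
      else (z0, l, r)
    let Z' := Z.set i st.1
    let acc' := if m < i ∧ m ≤ st.1 then acc ++ [(i : Int) - m - 1] else acc
    loopA t m (i + 1) Z' st.2.1 st.2.2 acc'
  else acc
termination_by t.length - i
decreasing_by omega

def find_pattern_indices (s : String) (p : String) : List Int :=
  let t := p.toList ++ '#' :: s.toList   -- s = p + "#" + s
  loopA t p.toList.length 1 (List.replicate t.length 0) 0 0 []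

-- ===== PORT B =====
-- Source B: for i in range(len(s)): if s[i:i+len(p)] == p: yield i
-- the slice s[i:i+len(p)] with 0 ≤ i is exactly (drop i).take (len p)
def find_pattern_indices_alt (s : String) (p : String) : List Int :=
  (List.range s.toList.length).filterMap (fun i =>
    if (s.toList.drop i).take p.toList.length = p.toList then some ((i : Nat) : Int) else none)

-- ===== PRECONDITION & SPEC =====
def Spec_find_pattern_indices (s : String) (p : String) (out : List Int) : Prop := out = find_pattern_indices_alt s p
instance (s : String) (p : String) (out : List Int) : Decidable (Spec_find_pattern_indices s p out) := by unfold Spec_find_pattern_indices; infer_instance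

-- ===== CLAIM (what is proved, stated in full; the proofs are below) =====
def Claim_equal_find_pattern_indices : Prop := ∀ (s : String) (p : String), Dom_find_pattern_indices s p → Spec_find_pattern_indices s p (find_pattern_indices s p)

-- ===== LEMMAS AND PROOFS =====

-- longest common prefix length of two lists
def lcp : List Char → List Char → Nat
  | a :: as, b :: bs => if a = b then lcp as bs + 1 else 0
  | _, _ => 0

theorem lcp_le_left (xs ys : List Char) : lcp xs ys ≤ xs.length := by
  induction xs generalizing ys with
  | nil => simp [lcp]
  | cons a as ih =>
    cases ys with
    | nil => simp [lcp]
    | cons b bs =>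
      simp only [lcp]
      split_ifs
      · simpa using ih bs
      · simp

theorem lcp_le_right (xs ys : List Char) : lcp xs ys ≤ ys.length := by
  induction xs generalizing ys with
  | nil => simp [lcp]
  | cons a as ih =>
    cases ys with
    | nil => simp [lcp]
    | cons b bs =>
      simp only [lcp]
      split_ifs
      · simpa using ih bs
      · simp

theorem le_lcp_iff (xs ys : List Char) (k : Nat) (hx : k ≤ xs.length) (hy : k ≤ ys.length) :
    k ≤ lcp xs ys ↔ ∀ j < k, xs.getD j 'a' = ys.getD j 'a' := by
  induction k generalizing xs ys with
  | zero => simp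
  | succ k ih =>
    cases xs with
    | nil => simp at hx
    | cons a as =>
      cases ys with
      | nil => simp at hy
      | cons b bs =>
        simp only [List.length_cons] at hx hy
        constructor
        · intro h j hj
          simp only [lcp] at h
          split_ifs at h with hab
          · cases j with
            | zero => simpa using hab
            | succ j =>
              have := (ih as bs (by omega) (by omega)).mp (by omega) j (by omega)
              simpa using this
          · omega
        · intro h
          have hab : a = b := by simpa using h 0 (by omega)
          have : k ≤ lcp as bs := by
            refine (ih as bs (by omega) (by omega)).mpr ?_
            intro j hj
            simpa using h (j + 1) (by omega)
          simp [lcp, hab]; omega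

theorem lcp_getD_ne (xs ys : List Char) (hx : lcp xs ys < xs.length)
    (hy : lcp xs ys < ys.length) : xs.getD (lcp xs ys) 'a' ≠ ys.getD (lcp xs ys) 'a' := by
  induction xs generalizing ys with
  | nil => simp at hx
  | cons a as ih =>
    cases ys with
    | nil => simp at hy
    | cons b bs =>
      by_cases hab : a = b
      · simp only [lcp, if_pos hab] at hx hy ⊢
        simpa using ih bs (by simpa using hx) (by simpa using hy)
      · simp [lcp, hab]

theorem lcp_eq_of (xs ys : List Char) (z : Nat) (hx : z ≤ xs.length) (hy : z ≤ ys.length)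
    (hagree : ∀ j < z, xs.getD j 'a' = ys.getD j 'a')
    (hstop : z = xs.length ∨ z = ys.length ∨ xs.getD z 'a' ≠ ys.getD z 'a') :
    lcp xs ys = z := by
  have hle : z ≤ lcp xs ys := (le_lcp_iff xs ys z hx hy).mpr hagree
  have hge : lcp xs ys ≤ z := by
    rcases hstop with h | h | h
    · have := lcp_le_left xs ys; omega
    · have := lcp_le_right xs ys; omega
    · by_contra hlt
      have hzx : z < xs.length := by
        have := lcp_le_left xs ys; omega
      have hzy : z < ys.length := by
        have := lcp_le_right xs ys; omega
      exact h ((le_lcp_iff xs ys (z + 1) hzx hzy).mp (by omega) z (by omega))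
  omega

theorem getD_drop (xs : List Char) (i j : Nat) :
    (xs.drop i).getD j 'a' = xs.getD (i + j) 'a' := by
  simp [List.getD_eq_getElem?_getD, List.getElem?_drop]

theorem zWhile_eq (t : List Char) (i z : Nat) (hi : 1 ≤ i) (hz : i + z ≤ t.length)
    (hagree : ∀ j < z, t.getD j 'a' = t.getD (i + j) 'a') :
    zWhile t i z = lcp t (t.drop i) := by
  have hdlen : (t.drop i).length = t.length - i := by simp
  rw [zWhile]
  split_ifs with h
  · exact zWhile_eq t i (z + 1) hi (by omega) (by
      intro j hj
      rcases Nat.lt_succ_iff_lt_or_eq.mp hj with hj | hj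
      · exact hagree j hj
      · subst hj; exact h.2)
  · symm
    refine lcp_eq_of t (t.drop i) z (by omega) (by omega) ?_ ?_
    · intro j hj
      rw [getD_drop]
      exact hagree j hj
    · by_cases hend : i + z < t.length
      · right; right
        rw [getD_drop]
        intro he
        exact h ⟨hend, he⟩
      · right; left; omega
termination_by t.length - (i + z)
decreasing_by omega

-- getD after set
theorem getD_set_nat (Z : List Nat) (i j v : Nat) (hi : i < Z.length) :
    (Z.set i v).getD j 0 = if j = i then v else Z.getD j 0 := by
  split_ifs with h
  · subst h; simp [List.getD_eq_getElem?_getD, hi]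
  · simp [List.getD_eq_getElem?_getD, List.getElem?_set_ne (by omega : i ≠ j)]

-- the main loop invariant: loopA appends exactly the matches with index ≥ i
theorem loopA_eq (t : List Char) (m i : Nat) (Z : List Nat) (l r : Nat) (acc : List Int)
    (hi : 1 ≤ i)
    (hZlen : Z.length = t.length)
    (hZ : ∀ j, 1 ≤ j → j < i → Z.getD j 0 = lcp t (t.drop j))
    (hlr : (l = 0 ∧ r = 0) ∨ (1 ≤ l ∧ l < i ∧ r = l + lcp t (t.drop l)))
    (hr : r ≤ t.length) :
    loopA t m i Z l r acc = acc ++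
      (List.range' i (t.length - i)).filterMap (fun j =>
        if m < j ∧ m ≤ lcp t (t.drop j) then some ((j : Int) - m - 1) else none) := by
  rw [loopA]
  split_ifs with hin
  · -- the window fact: for l ≥ 1, positions in [l, r) copy the prefix
    have hwindow : ∀ q, l ≤ q → q < r → 1 ≤ l → t.getD q 'a' = t.getD (q - l) 'a' := by
      intro q hq1 hq2 hl1
      rcases hlr with ⟨_, hr0⟩ | ⟨_, _, hreq⟩
      · omega
      · have : q - l < lcp t (t.drop l) := by omega
        have := (le_lcp_iff t (t.drop l) (lcp t (t.drop l)) (lcp_le_left _ _)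
          (lcp_le_right _ _)).mp (le_refl _) (q - l) this
        rw [getD_drop] at this
        rw [this]
        congr 1
        omega
    set z0 := Z.getD (i - l) 0 with hz0
    by_cases hbr : r ≤ i + z0
    · -- recompute branch
      simp only [if_pos hbr]
      have hagree : ∀ j < r - i, t.getD j 'a' = t.getD (i + j) 'a' := by
        intro j hj
        -- here i < r, so l ≥ 1 and z0 = lcp t (drop (i-l) t) ≥ r - i
        have hil : 1 ≤ l := by
          rcases hlr with ⟨_, hr0⟩ | ⟨h1, _, _⟩
          · omega
          · exact h1
        have hli : l < i := by
          rcases hlr with ⟨hl0, hr0⟩ | ⟨_, h2, _⟩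
          · omega
          · exact h2
        have hz0eq : z0 = lcp t (t.drop (i - l)) := hZ (i - l) (by omega) (by omega)
        have hjz : j < z0 := by omega
        have h1 : t.getD j 'a' = t.getD ((i - l) + j) 'a' := by
          have := (le_lcp_iff t (t.drop (i - l)) z0 (by rw [hz0eq]; exact lcp_le_left _ _)
            (by rw [hz0eq]; exact lcp_le_right _ _)).mp (by omega) j hjz
          rw [getD_drop] at this
          exact this
        have h2 : t.getD (i + j) 'a' = t.getD ((i + j) - l) 'a' :=
          hwindow (i + j) (by omega) (by omega) hil
        rw [h1, h2]
        congr 1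
        omega
      have hzw : zWhile t i (r - i) = lcp t (t.drop i) :=
        zWhile_eq t i (r - i) hi (by omega) hagree
      rw [loopA_eq t m (i + 1) (Z.set i (zWhile t i (r - i)))
            i (i + zWhile t i (r - i)) _ (by omega) (by simpa using hZlen)
            ?_ ?_ ?_]
      · rw [hzw]
        have hrange : List.range' i (t.length - i) =
            i :: List.range' (i + 1) (t.length - (i + 1)) := by
          have : t.length - i = (t.length - (i + 1)) + 1 := by omega
          rw [this, List.range'_succ]
        rw [hrange, List.filterMap_cons]
        split_ifs with hc
        · simp
        · simp
      · intro j h1 h2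
        rw [getD_set_nat Z i j _ (by omega)]
        split_ifs with hji
        · subst hji; exact hzw
        · exact hZ j h1 (by omega)
      · right
        exact ⟨by omega, by omega, by rw [hzw]⟩
      · have := lcp_le_right t (t.drop i)
        simp only [List.length_drop] at this
        rw [hzw]; omega
    · -- copy branch: i + z0 < r, so l ≥ 1, l < i < r, and lcp at i equals z0
      simp only [if_neg hbr]
      have hil : 1 ≤ l := by
        rcases hlr with ⟨hl0, hr0⟩ | ⟨h1, _, _⟩
        · omega
        · exact h1
      have hli : l < i := by
        rcases hlr with ⟨hl0, hr0⟩ | ⟨_, h2, _⟩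
        · omega
        · exact h2
      have hz0eq : z0 = lcp t (t.drop (i - l)) := hZ (i - l) (by omega) (by omega)
      have hir : i < r := by omega
      have hagree : ∀ j < z0, t.getD j 'a' = t.getD (i + j) 'a' := by
        intro j hj
        have h1 : t.getD j 'a' = t.getD ((i - l) + j) 'a' := by
          have := (le_lcp_iff t (t.drop (i - l)) z0 (by rw [hz0eq]; exact lcp_le_left _ _)
            (by rw [hz0eq]; exact lcp_le_right _ _)).mp (by omega) j hj
          rw [getD_drop] at this
          exact this
        have h2 : t.getD (i + j) 'a' = t.getD ((i + j) - l) 'a' :=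
          hwindow (i + j) (by omega) (by omega) hil
        rw [h1, h2]
        congr 1
        omega
      have hlcpi : lcp t (t.drop i) = z0 := by
        refine lcp_eq_of t (t.drop i) z0 (by omega) (by simp; omega) ?_ ?_
        · intro j hj
          rw [getD_drop]
          exact hagree j hj
        · right; right
          rw [getD_drop]
          -- mismatch: t[z0] ≠ t[(i-l)+z0] = t[i+z0]
          have hmis : t.getD z0 'a' ≠ (t.drop (i - l)).getD z0 'a' := by
            rw [hz0eq]
            exact lcp_getD_ne t (t.drop (i - l)) (by rw [← hz0eq]; omega)
              (by rw [← hz0eq]; simp; omega)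
          rw [getD_drop] at hmis
          have h2 : t.getD (i + z0) 'a' = t.getD ((i + z0) - l) 'a' :=
            hwindow (i + z0) (by omega) (by omega) hil
          rw [h2]
          intro he
          apply hmis
          rw [show i - l + z0 = i + z0 - l by omega]
          exact he
      rw [loopA_eq t m (i + 1) (Z.set i z0) l r _ (by omega) (by simpa using hZlen)
            ?_ ?_ hr]
      · rw [← hlcpi]
        have hrange : List.range' i (t.length - i) =
            i :: List.range' (i + 1) (t.length - (i + 1)) := by
          have : t.length - i = (t.length - (i + 1)) + 1 := by omega
          rw [this, List.range'_succ]
        rw [hrange, List.filterMap_cons]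
        split_ifs with hc
        · simp
        · simp
      · intro j h1 h2
        rw [getD_set_nat Z i j _ (by omega)]
        split_ifs with hji
        · subst hji; rw [hlcpi]
        · exact hZ j h1 (by omega)
      · right
        exact ⟨hil, by omega, by
          rcases hlr with ⟨hl0, _⟩ | ⟨_, _, hreq⟩
          · omega
          · exact hreq⟩
  · simp only [show t.length - i = 0 by omega, List.range'_zero, List.filterMap_nil,
      List.append_nil]
termination_by t.length - i
decreasing_by all_goals omega

-- ===== VERDICT (by name: the statement is the Claim_ definition above) =====
theorem find_pattern_indices_spec : Claim_equal_find_pattern_indices := by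
  intro s p _
  unfold Spec_find_pattern_indices find_pattern_indices find_pattern_indices_alt
  set S := s.toList with hS
  set P := p.toList with hP
  set m := P.length with hm
  set t := P ++ '#' :: S with ht
  have htlen : t.length = m + 1 + S.length := by simp [ht, hm]; omega
  rw [loopA_eq t m 1 (List.replicate t.length 0) 0 0 [] (le_refl _)
        (by simp) (by omega) (Or.inl ⟨rfl, rfl⟩) (by omega)]
  rw [List.nil_append]
  -- split range' 1 (t.length - 1) = range' 1 m ++ range' (m+1) S.length
  have hsplit : List.range' 1 (t.length - 1) =
      List.range' 1 m ++ List.range' (m + 1) S.length := by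
    rw [show t.length - 1 = m + S.length by omega,
      show m + 1 = 1 + 1 * m by omega, ← List.range'_append]
  rw [hsplit, List.filterMap_append]
  have hfirst : (List.range' 1 m).filterMap (fun j =>
      if m < j ∧ m ≤ lcp t (t.drop j) then some ((j : Int) - m - 1) else none) = [] := by
    rw [List.filterMap_eq_nil_iff]
    intro j hj
    have : j < m + 1 := by
      have := List.mem_range'_1.mp hj
      omega
    simp only [ite_eq_right_iff]
    intro hc
    omega
  rw [hfirst, List.nil_append]
  have hsecond : List.range' (m + 1) S.length =
      (List.range S.length).map (fun k => (m + 1) + k) := by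
    rw [List.range_eq_range', List.map_add_range']
  rw [hsecond, List.filterMap_map]
  apply List.filterMap_congr
  intro k hk
  have hkS : k < S.length := List.mem_range.mp hk
  have hdrop : t.drop ((m + 1) + k) = S.drop k := by
    rw [ht]
    rw [show (m + 1) + k = (P ++ ['#']).length + k by simp [hm]]
    rw [show P ++ '#' :: S = (P ++ ['#']) ++ S by simp]
    rw [List.drop_append]
    simp
  have htake : t.take m = P := by
    rw [ht, List.take_append_of_le_length (by omega), List.take_length]
  simp only [Function.comp]
  have hcond : (m < (m + 1) + k ∧ m ≤ lcp t (t.drop ((m + 1) + k))) ↔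
      ((S.drop k).take m = P) := by
    rw [hdrop]
    constructor
    · intro ⟨_, hle⟩
      have hlen : m + k ≤ S.length := by
        have h := lcp_le_right t (S.drop k)
        simp only [List.length_drop] at h
        omega
      have h1 : ∀ j < m, t.getD j 'a' = (S.drop k).getD j 'a' :=
        fun j hj => (le_lcp_iff t (S.drop k) m (by omega)
          (by simp only [List.length_drop]; omega)).mp hle j hj
      -- take m equal
      apply List.ext_getElem
      · simp only [List.length_take, List.length_drop, hm]
        omega
      · intro n hn1 hn2
        have hnm : n < m := by
          simp only [List.length_take, List.length_drop] at hn1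
          omega
        have hda := h1 n hnm
        rw [List.getD_eq_getElem _ _ (by omega),
          List.getD_eq_getElem _ _ (by simp only [List.length_drop]; omega)] at hda
        calc ((S.drop k).take m)[n]
            = (S.drop k)[n]'(by simp only [List.length_drop]; omega) := List.getElem_take
          _ = t[n]'(by omega) := hda.symm
          _ = P[n]'(by omega) := List.getElem_append_left (by omega)
    · intro htk
      have hlen : m + k ≤ S.length := by
        have hh : ((S.drop k).take m).length = P.length := by rw [htk]
        simp only [List.length_take, List.length_drop] at hh
        omega
      refine ⟨by omega, (le_lcp_iff t (S.drop k) m (by omega)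
        (by simp only [List.length_drop]; omega)).mpr ?_⟩
      intro j hj
      have e1 : t.getD j 'a' = P.getD j 'a' := by
        rw [List.getD_eq_getElem _ _ (by omega), List.getD_eq_getElem _ _ (by omega)]
        exact List.getElem_append_left (by omega)
      have e2 : (S.drop k).getD j 'a' = ((S.drop k).take m).getD j 'a' := by
        rw [List.getD_eq_getElem _ _ (by simp only [List.length_drop]; omega),
          List.getD_eq_getElem _ _ (by simp only [List.length_take, List.length_drop]; omega)]
        simp [List.getElem_take]
      rw [e1, e2, htk]
  rw [if_congr hcond rfl rfl]
  split_ifs with hc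
  · congr 1
    push_cast
    ring
  · rfl
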